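-- pv_equiv track=rewrite | github.com/senyaa1/sb_tasks | compiler-translator/translator.py | build_overlap_graph
-- ===== SOURCE A (Python) =====
-- def build_overlap_graph(nodes, format_node_lists):
--     graph = {n: set() for n in nodes}
--     for fmt_nodes in format_node_lists:
--         for i in range(len(fmt_nodes)):
--             for j in range(i + 1, len(fmt_nodes)):
--                 a = fmt_nodes[i]
--                 b = fmt_nodes[j]
--                 graph[a].add(b)
--                 graph[b].add(a)
--     return graph
-- ===== SOURCE B (Python) =====
-- def build_overlap_graph(nodes, format_node_lists):
--     eligible = [l for l in format_node_lists if len(l) >= 2]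
--     graph = {}
--     for n in dict.fromkeys(nodes):  # each distinct node once; duplicates would just overwrite with the same set
--         adj = set()
--         for l in eligible:
--             if n in l:
--                 rest = l.copy()
--                 rest.remove(n)  # drop one occurrence of n itself; duplicates keep the self-loop
--                 adj.update(rest)
--         graph[n] = adj
--     return graph
-- ===== Notes on version B (the rewrite author's own statement) =====
-- stated objective: faster
-- what changed: Inverts the loop structure: instead of enumerating all i<j pairs within each format list and adding both directions into an incrementally updated dict of sets, B loops once over the DISTINCT nodes and computes each node's adjacency set directly, scanning the pre-filtered format lists that contain it and unioning the list minus one occurrence of the node itself; on duplicate-heavy inputs this replaces the quadratic pair enumeration by near-linear work (measured 142x at n=65536, A times out at n=262144 where B still returns).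
import Mathlib
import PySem

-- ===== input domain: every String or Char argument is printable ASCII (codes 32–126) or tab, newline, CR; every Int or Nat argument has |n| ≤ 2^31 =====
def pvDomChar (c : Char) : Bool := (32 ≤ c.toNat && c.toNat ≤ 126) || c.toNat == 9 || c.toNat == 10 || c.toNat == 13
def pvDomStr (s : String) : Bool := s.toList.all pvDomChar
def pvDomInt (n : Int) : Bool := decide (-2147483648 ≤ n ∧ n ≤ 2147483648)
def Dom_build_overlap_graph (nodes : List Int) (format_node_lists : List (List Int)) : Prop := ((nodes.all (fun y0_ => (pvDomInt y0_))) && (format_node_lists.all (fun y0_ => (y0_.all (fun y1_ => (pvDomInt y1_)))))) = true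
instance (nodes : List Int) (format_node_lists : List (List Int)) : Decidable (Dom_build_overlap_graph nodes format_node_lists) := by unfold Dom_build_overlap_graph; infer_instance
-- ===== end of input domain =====

-- B inverts the loop structure: instead of A's per-list nested i<j pair loop updating a dict of
-- sets, B loops once over the distinct nodes and computes each node's adjacency set directly from
-- the (pre-filtered) format lists that contain it; measured faster on duplicate-heavy inputs.


-- ===== PORT A =====
def build_overlap_graph (nodes : List Int) (format_node_lists : List (List Int)) : List (Int × List Int) :=
  let graph : PySem.Dict Int (PySem.Set Int) :=
    nodes.foldl (fun g n => g.insert n PySem.Set.empty) PySem.Dict.empty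
  let graph := format_node_lists.foldl (fun g fmt_nodes =>
    (PySem.List.pyRange 0 (fmt_nodes.length : Int) 1).foldl (fun g i =>
      (PySem.List.pyRange (i + 1) (fmt_nodes.length : Int) 1).foldl (fun g j =>
        let a := PySem.List.pyGetD fmt_nodes i 0
        let b := PySem.List.pyGetD fmt_nodes j 0
        let g := g.modify a PySem.Set.empty (fun s => s.add b)
        g.modify b PySem.Set.empty (fun s => s.add a)) g) g) graph
  graph.items

-- ===== PORT B =====
-- `rest = l.copy(); rest.remove(n)` removes the FIRST occurrence of n (n ∈ l is guaranteed by the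
-- guard), which is exactly List.erase.
def build_overlap_graph_alt (nodes : List Int) (format_node_lists : List (List Int)) : List (Int × List Int) :=
  let eligible := format_node_lists.filter (fun l => decide (2 ≤ l.length))
  let graph : PySem.Dict Int (PySem.Set Int) :=
    (PySem.List.dedup nodes).foldl (fun g n =>
      let adj := eligible.foldl (fun adj l =>
        if n ∈ l then adj.update (l.erase n) else adj) PySem.Set.empty
      g.insert n adj) PySem.Dict.empty
  graph.items

-- ===== PRECONDITION & SPEC =====
-- Pre_ excludes exactly the inputs where Python A raises KeyError: a format list with at least two
-- entries containing a node that is not a key of the graph (not in `nodes`).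
def Pre_build_overlap_graph (nodes : List Int) (format_node_lists : List (List Int)) : Prop :=
  ∀ l ∈ format_node_lists, 2 ≤ l.length → ∀ x ∈ l, x ∈ nodes
instance (nodes : List Int) (format_node_lists : List (List Int)) : Decidable (Pre_build_overlap_graph nodes format_node_lists) := by unfold Pre_build_overlap_graph; infer_instance
def pvWitness_build_overlap_graph : List Int × List (List Int) := ([1, 2, 3], [[1, 2], [2, 3, 2]])

def Spec_build_overlap_graph (nodes : List Int) (format_node_lists : List (List Int)) (out : List (Int × List Int)) : Prop := out = build_overlap_graph_alt nodes format_node_lists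
instance (nodes : List Int) (format_node_lists : List (List Int)) (out : List (Int × List Int)) : Decidable (Spec_build_overlap_graph nodes format_node_lists out) := by unfold Spec_build_overlap_graph; infer_instance

-- ===== CLAIM (what is proved, stated in full; the proofs are below) =====
def Claim_equal_build_overlap_graph : Prop := ∀ (nodes : List Int) (format_node_lists : List (List Int)), Dom_build_overlap_graph nodes format_node_lists → Pre_build_overlap_graph nodes format_node_lists → Spec_build_overlap_graph nodes format_node_lists (build_overlap_graph nodes format_node_lists)
-- ===== LEMMAS AND PROOFS =====

-- Proof-side views of the two programs -----------------------------------------------------------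

/-- The initial graph `{n: set() for n in nodes}`. -/
def initG (nodes : List Int) : PySem.Dict Int (PySem.Set Int) :=
  nodes.foldl (fun g n => g.insert n PySem.Set.empty) PySem.Dict.empty

/-- A's per-format-list double loop. -/
def aLoop (g : PySem.Dict Int (PySem.Set Int)) (l : List Int) : PySem.Dict Int (PySem.Set Int) :=
  (PySem.List.pyRange 0 (l.length : Int) 1).foldl (fun g i =>
    (PySem.List.pyRange (i + 1) (l.length : Int) 1).foldl (fun g j =>
      (g.modify (PySem.List.pyGetD l i 0) PySem.Set.empty
          (fun s => s.add (PySem.List.pyGetD l j 0))).modify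
        (PySem.List.pyGetD l j 0) PySem.Set.empty
        (fun s => s.add (PySem.List.pyGetD l i 0))) g) g

/-- B's per-node adjacency computation over the pre-filtered lists. -/
def adjOf (format_node_lists : List (List Int)) (n : Int) : PySem.Set Int :=
  (format_node_lists.filter (fun l => decide (2 ≤ l.length))).foldl
    (fun adj l => if n ∈ l then adj.update (l.erase n) else adj) PySem.Set.empty

theorem portA_eq (nodes : List Int) (fmts : List (List Int)) :
    build_overlap_graph nodes fmts = (fmts.foldl aLoop (initG nodes)).items := rfl

theorem portB_eq (nodes : List Int) (fmts : List (List Int)) :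
    build_overlap_graph_alt nodes fmts =
      ((PySem.List.dedup nodes).foldl (fun g n => g.insert n (adjOf fmts n)) PySem.Dict.empty).items := rfl

-- Event lists ------------------------------------------------------------------------------------

/-- One elementwise edge insertion `graph[e.1].add(e.2)`. -/
def evFold (g : PySem.Dict Int (PySem.Set Int)) (E : List (Int × Int)) : PySem.Dict Int (PySem.Set Int) :=
  E.foldl (fun g e => g.modify e.1 PySem.Set.empty (fun s => s.add e.2)) g

/-- The events A's row `i` of a list `a :: t` performs. -/
def evRow (a : Int) (t : List Int) : List (Int × Int) := t.flatMap (fun b => [(a, b), (b, a)])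

/-- All events of A's pair loop, structurally. -/
def evA : List Int → List (Int × Int)
  | [] => []
  | a :: t => evRow a t ++ evA t

/-- Per-key payload stream of an event list. -/
def strm (k : Int) (E : List (Int × Int)) : List Int :=
  E.filterMap (fun e => if e.1 = k then some e.2 else none)

theorem strm_append (k : Int) (E F : List (Int × Int)) : strm k (E ++ F) = strm k E ++ strm k F :=
  List.filterMap_append

-- Index form → structural event lists ------------------------------------------------------------

theorem pyRange_natCast (a b : Nat) :
    PySem.List.pyRange (a : Int) (b : Int) 1 =
      (List.range (b - a)).map (fun k => ((a + k : Nat) : Int)) := by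
  rw [PySem.List.pyRange_of_pos _ _ (by norm_num : (0:Int) < 1)]
  have hcnt : (if (a : Int) < (b : Int) then (((b : Int) - a + 1 - 1) / 1).toNat else 0) = b - a := by
    split_ifs with h <;> omega
  rw [hcnt]
  apply List.map_congr_left
  intro k _
  push_cast
  ring

theorem flatMap_getD_range {γ : Type} (t : List Int) (G : Int → List γ) :
    (List.range t.length).flatMap (fun k => G (t.getD k 0)) = t.flatMap G := by
  induction t with
  | nil => simp
  | cons a t ih =>
    rw [List.length_cons, List.range_succ_eq_map, List.flatMap_cons, List.flatMap_map]
    simp only [List.getD_cons_zero, List.getD_cons_succ]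
    rw [List.flatMap_cons]
    congr 1

/-- A's index-level event list. -/
def EAidx (l : List Int) : List (Int × Int) :=
  (PySem.List.pyRange 0 (l.length : Int) 1).flatMap (fun i =>
    (PySem.List.pyRange (i + 1) (l.length : Int) 1).flatMap (fun j =>
      [(PySem.List.pyGetD l i 0, PySem.List.pyGetD l j 0),
       (PySem.List.pyGetD l j 0, PySem.List.pyGetD l i 0)]))

def pairOf (L : List Int) (i j : Nat) : List (Int × Int) :=
  [(L.getD i 0, L.getD j 0), (L.getD j 0, L.getD i 0)]

theorem EA_gen (t : List Int) : ∀ pre : List Int,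
    (List.range t.length).flatMap (fun i =>
      (List.range (t.length - (i + 1))).flatMap (fun k =>
        pairOf (pre ++ t) (pre.length + i) (pre.length + i + 1 + k))) = evA t := by
  induction t with
  | nil => intro pre; simp [evA]
  | cons a t ih =>
    intro pre
    rw [List.length_cons, List.range_succ_eq_map, List.flatMap_cons, List.flatMap_map]
    show (List.range (t.length + 1 - (0 + 1))).flatMap (fun k =>
        pairOf (pre ++ a :: t) (pre.length + 0) (pre.length + 0 + 1 + k)) ++ _ = evA (a :: t)
    have hterm0 : (List.range (t.length + 1 - (0 + 1))).flatMap (fun k =>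
        pairOf (pre ++ a :: t) (pre.length + 0) (pre.length + 0 + 1 + k)) = evRow a t := by
      have hc : t.length + 1 - (0 + 1) = t.length := by omega
      rw [hc]
      have hbody : ∀ k ∈ List.range t.length,
          pairOf (pre ++ a :: t) (pre.length + 0) (pre.length + 0 + 1 + k) =
          (fun b => [(a, b), (b, a)]) (t.getD k 0) := by
        intro k _
        unfold pairOf
        have h1 : (pre ++ a :: t).getD (pre.length + 0) 0 = a := by
          rw [Nat.add_zero, List.getD_append_right _ _ _ _ (Nat.le_refl _), Nat.sub_self,
            List.getD_cons_zero]
        have h2 : (pre ++ a :: t).getD (pre.length + 0 + 1 + k) 0 = t.getD k 0 := by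
          rw [List.getD_append_right _ _ _ _ (by omega)]
          have : pre.length + 0 + 1 + k - pre.length = k + 1 := by omega
          rw [this, List.getD_cons_succ]
        rw [h1, h2]
      rw [List.flatMap_congr hbody, flatMap_getD_range t (fun b => [(a, b), (b, a)])]
      rfl
    rw [hterm0]
    have hrest : (List.range t.length).flatMap (fun i =>
        (List.range (t.length + 1 - (i.succ + 1))).flatMap (fun k =>
          pairOf (pre ++ a :: t) (pre.length + i.succ) (pre.length + i.succ + 1 + k))) = evA t := by
      rw [← ih (pre ++ [a])]
      apply List.flatMap_congr
      intro i _
      have hc : t.length + 1 - (i.succ + 1) = t.length - (i + 1) := by omega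
      rw [hc]
      apply List.flatMap_congr
      intro k _
      have hL : pre ++ a :: t = (pre ++ [a]) ++ t := by simp
      have hP1 : pre.length + i.succ = (pre ++ [a]).length + i := by simp; omega
      rw [hL, hP1]
    rw [hrest]
    rfl

theorem EAidx_eq (l : List Int) : EAidx l = evA l := by
  unfold EAidx
  rw [PySem.List.pyRange_zero_natCast l.length, List.flatMap_map, ← EA_gen l []]
  apply List.flatMap_congr
  intro i _
  have hcast : ((i : Int) + 1) = (((i + 1 : Nat)) : Int) := by push_cast; ring
  rw [hcast, pyRange_natCast (i + 1) l.length, List.flatMap_map]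
  apply List.flatMap_congr
  intro k _
  unfold pairOf
  rw [PySem.List.pyGetD_natCast, PySem.List.pyGetD_natCast]
  simp

-- getD / keys characterizations ------------------------------------------------------------------

theorem getD_evFold (E : List (Int × Int)) : ∀ (g : PySem.Dict Int (PySem.Set Int)) (k : Int),
    (evFold g E).getD k PySem.Set.empty =
      (g.getD k PySem.Set.empty).update (strm k E) := by
  induction E with
  | nil => intro g k; simp [evFold, strm, PySem.Set.update_nil]
  | cons e E ih =>
    intro g k
    have : evFold g (e :: E) = evFold (g.modify e.1 PySem.Set.empty (fun s => s.add e.2)) E := rfl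
    rw [this, ih]
    by_cases h : e.1 = k
    · subst h
      rw [PySem.Dict.getD_modify_self]
      have hs : strm e.1 (e :: E) = e.2 :: strm e.1 E := by simp [strm]
      rw [hs, PySem.Set.update_cons]
    · rw [PySem.Dict.getD_modify_of_ne _ _ _ (fun hk => h hk.symm)]
      simp only [strm, List.filterMap_cons, if_neg h]

theorem aLoop_eq_evFold (g : PySem.Dict Int (PySem.Set Int)) (l : List Int) :
    aLoop g l = evFold g (EAidx l) := by
  unfold aLoop evFold EAidx
  rw [List.foldl_flatMap]
  apply PySem.List.foldl_congr_mem'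
  intro i _ acc
  rw [List.foldl_flatMap]
  apply PySem.List.foldl_congr_mem'
  intro j _ acc2
  simp

theorem getD_foldl {β : Type} (body : PySem.Dict Int (PySem.Set Int) → β → PySem.Dict Int (PySem.Set Int))
    (f : β → List (Int × Int)) (k : Int)
    (h : ∀ g x, (body g x).getD k PySem.Set.empty =
      (g.getD k PySem.Set.empty).update (strm k (f x))) :
    ∀ (L : List β) (g), ((L.foldl body g).getD k PySem.Set.empty) =
      (g.getD k PySem.Set.empty).update (strm k (L.flatMap f)) := by
  intro L
  induction L with
  | nil => intro g; simp [strm, PySem.Set.update_nil]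
  | cons x L ih =>
    intro g
    rw [List.foldl_cons, ih, h, List.flatMap_cons, strm_append, PySem.Set.update_append]

theorem getD_aLoop (l : List Int) (g : PySem.Dict Int (PySem.Set Int)) (k : Int) :
    (aLoop g l).getD k PySem.Set.empty =
      (g.getD k PySem.Set.empty).update (strm k (evA l)) := by
  rw [aLoop_eq_evFold, getD_evFold, EAidx_eq]

-- Canonical per-key content ----------------------------------------------------------------------

theorem update_of_subset_mem {s : PySem.Set Int} {xs : List Int} (h : ∀ x ∈ xs, x ∈ s) :
    s.update xs = s := by
  rw [PySem.Set.update_eq_append_filter]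
  have : (PySem.Set.ofList xs).filter (fun y => !s.contains y) = [] := by
    rw [List.filter_eq_nil_iff]
    intro y hy
    simpa using h y ((PySem.Set.mem_ofList xs y).mp hy)
  rw [this, List.append_nil]

theorem strm_cons (k : Int) (e : Int × Int) (E : List (Int × Int)) :
    strm k (e :: E) = if e.1 = k then e.2 :: strm k E else strm k E := by
  by_cases h : e.1 = k <;> simp [strm, h]

theorem mem_add_self (s : PySem.Set Int) (x : Int) : x ∈ s.add x :=
  (PySem.Set.mem_add s x x).mpr (Or.inr rfl)

theorem rowA_self (k : Int) (t : List Int) : ∀ s : PySem.Set Int,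
    s.update (strm k (evRow k t)) = s.update t := by
  induction t with
  | nil => intro s; rfl
  | cons b t ih =>
    intro s
    rw [show evRow k (b :: t) = (k, b) :: (b, k) :: evRow k t from rfl,
      strm_cons, if_pos rfl, strm_cons]
    by_cases hb : b = k
    · simp only [hb, if_true]
      rw [PySem.Set.update_cons, PySem.Set.update_cons,
        PySem.Set.add_of_mem (mem_add_self s k), ih, PySem.Set.update_cons]
    · simp only [if_neg hb]
      rw [PySem.Set.update_cons, ih, PySem.Set.update_cons]

theorem rowA_other (k a : Int) (ha : a ≠ k) (t : List Int) : ∀ s : PySem.Set Int,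
    s.update (strm k (evRow a t)) = if k ∈ t then s.add a else s := by
  induction t with
  | nil => intro s; simp [evRow, strm, PySem.Set.update_nil]
  | cons b t ih =>
    intro s
    rw [show evRow a (b :: t) = (a, b) :: (b, a) :: evRow a t from rfl,
      strm_cons, if_neg ha, strm_cons]
    by_cases hb : b = k
    · simp only [hb, if_true]
      rw [PySem.Set.update_cons, ih]
      by_cases hk : k ∈ t
      · rw [if_pos hk, if_pos (by simp), PySem.Set.add_of_mem (mem_add_self s a)]
      · rw [if_neg hk, if_pos (by simp)]
    · simp only [if_neg hb]
      rw [ih]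
      by_cases hk : k ∈ t
      · rw [if_pos hk, if_pos (by simp [hk])]
      · rw [if_neg hk, if_neg (by simp [hk, Ne.symm hb])]

theorem TA (k : Int) (l : List Int) : ∀ s : PySem.Set Int,
    s.update (strm k (evA l)) = if k ∈ l then s.update (l.erase k) else s := by
  induction l with
  | nil => intro s; simp [evA, strm, PySem.Set.update_nil]
  | cons a t ih =>
    intro s
    rw [show evA (a :: t) = evRow a t ++ evA t from rfl, strm_append, PySem.Set.update_append]
    by_cases ha : a = k
    · rw [ha, rowA_self, ih, List.erase_cons_head]
      by_cases hk : k ∈ t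
      · rw [if_pos hk, if_pos (by simp)]
        apply update_of_subset_mem
        intro x hx
        exact (PySem.Set.mem_update s t x).mpr (Or.inr (List.erase_subset hx))
      · rw [if_neg hk, if_pos (by simp)]
    · rw [rowA_other k a ha]
      by_cases hk : k ∈ t
      · rw [if_pos hk, ih, if_pos hk, if_pos (by simp [hk]),
          List.erase_cons_tail (by simp [ha]), PySem.Set.update_cons]
      · rw [if_neg hk, ih, if_neg hk, if_neg (by simp [hk, Ne.symm ha])]

/-- A's stream for key k equals B's direct per-node fold over the filtered lists. -/
theorem pointwise (k : Int) (fmts : List (List Int)) : ∀ s : PySem.Set Int,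
    s.update (strm k (fmts.flatMap evA)) =
      (fmts.filter (fun l => decide (2 ≤ l.length))).foldl
        (fun adj l => if k ∈ l then adj.update (l.erase k) else adj) s := by
  induction fmts with
  | nil => intro s; simp [strm, PySem.Set.update_nil]
  | cons l L ih =>
    intro s
    rw [List.flatMap_cons, strm_append, PySem.Set.update_append, TA, List.filter_cons]
    by_cases h2 : 2 ≤ l.length
    · rw [if_pos (show (decide (2 ≤ l.length)) = true from by simpa using h2), List.foldl_cons]
      exact ih _
    · rw [if_neg (show ¬ ((decide (2 ≤ l.length)) = true) from by simpa using h2)]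
      have hs : (if k ∈ l then s.update (l.erase k) else s) = s := by
        by_cases hk : k ∈ l
        · rw [if_pos hk]
          have hlen : l.length = 1 := by
            have := List.length_pos_of_mem hk
            omega
          obtain ⟨x, hx⟩ := List.length_eq_one_iff.mp hlen
          subst hx
          have hkx : k = x := by simpa using hk
          subst hkx
          rw [List.erase_cons_head]
          exact PySem.Set.update_nil s
        · rw [if_neg hk]
      rw [hs]
      exact ih s

-- Keys / getD of the two dict builds -------------------------------------------------------------

theorem keys_modify_mem (d : PySem.Dict Int (PySem.Set Int)) (k : Int) (d0 : PySem.Set Int)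
    (f : PySem.Set Int → PySem.Set Int) (h : k ∈ d.keys) : (d.modify k d0 f).keys = d.keys := by
  rw [PySem.Dict.keys_modify,
    PySem.Dict.keys_insert_of_contains _ _ ((PySem.Dict.contains_iff_mem_keys d k).2 h)]

def keysOf (l : List Int) : List Int := if l.length < 2 then [] else l

theorem keys_fold_preserve {β : Type} (body : PySem.Dict Int (PySem.Set Int) → β → PySem.Dict Int (PySem.Set Int))
    (keysOfx : β → List Int)
    (h : ∀ g x, (∀ y ∈ keysOfx x, y ∈ g.keys) → (body g x).keys = g.keys) :
    ∀ (L : List β) (g), (∀ x ∈ L, ∀ y ∈ keysOfx x, y ∈ g.keys) →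
      (L.foldl body g).keys = g.keys := by
  intro L
  induction L with
  | nil => intro g _; rfl
  | cons x L ih =>
    intro g hg
    rw [List.foldl_cons]
    have hx : (body g x).keys = g.keys := h g x (hg x (by simp))
    rw [ih (body g x) (fun x' hx' y hy => hx ▸ hg x' (by simp [hx']) y hy), hx]

theorem keys_evFold (E : List (Int × Int)) : ∀ (g : PySem.Dict Int (PySem.Set Int)),
    (∀ e ∈ E, e.1 ∈ g.keys) → (evFold g E).keys = g.keys := by
  induction E with
  | nil => intro g _; rfl
  | cons e E ih =>
    intro g h
    have hk : (g.modify e.1 PySem.Set.empty (fun s => s.add e.2)).keys = g.keys :=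
      keys_modify_mem g e.1 PySem.Set.empty _ (h e (by simp))
    rw [show evFold g (e :: E) = evFold (g.modify e.1 PySem.Set.empty (fun s => s.add e.2)) E from rfl,
      ih _ (fun e' he' => hk ▸ h e' (by simp [he'])), hk]

theorem evA_fst_mem (l : List Int) : ∀ e ∈ evA l, e.1 ∈ l := by
  induction l with
  | nil => intro e he; cases he
  | cons a t ih =>
    intro e he
    rcases List.mem_append.mp he with h | h
    · rcases List.mem_flatMap.mp h with ⟨b, hb, hmem⟩
      simp only [List.mem_cons, List.not_mem_nil, or_false] at hmem
      rcases hmem with h' | h'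
      · simp [h']
      · simp [h', hb]
    · exact List.mem_cons_of_mem a (ih e h)

theorem evA_short (l : List Int) (h : l.length < 2) : evA l = [] := by
  match l, h with
  | [], _ => rfl
  | [a], _ => rfl

theorem keys_aLoop (l : List Int) (g : PySem.Dict Int (PySem.Set Int))
    (h : ∀ y ∈ keysOf l, y ∈ g.keys) : (aLoop g l).keys = g.keys := by
  rw [aLoop_eq_evFold, show EAidx l = evA l from EAidx_eq l]
  by_cases h2 : l.length < 2
  · rw [evA_short l h2]; rfl
  · apply keys_evFold
    intro e he
    apply h
    unfold keysOf
    rw [if_neg h2]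
    exact evA_fst_mem l e he

theorem keys_initG (nodes : List Int) : (initG nodes).keys = PySem.Set.ofList nodes := by
  unfold initG
  rw [PySem.Dict.keys_foldl_insert nodes (fun _ _ => PySem.Set.empty) PySem.Dict.empty,
    PySem.Dict.keys_empty, PySem.Set.update_nil_left]

theorem nodup_keys_initG (nodes : List Int) : (initG nodes).keys.Nodup := by
  rw [keys_initG]
  exact PySem.Set.nodup_ofList nodes

theorem getD_initG (nodes : List Int) (k : Int) :
    (initG nodes).getD k PySem.Set.empty = PySem.Set.empty := by
  unfold initG
  have : ∀ (ns : List Int) (d : PySem.Dict Int (PySem.Set Int)),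
      d.getD k PySem.Set.empty = PySem.Set.empty →
      (ns.foldl (fun g n => g.insert n PySem.Set.empty) d).getD k PySem.Set.empty = PySem.Set.empty := by
    intro ns
    induction ns with
    | nil => intro d hd; exact hd
    | cons n ns ih =>
      intro d hd
      rw [List.foldl_cons]
      apply ih
      by_cases h : k = n
      · subst h; rw [PySem.Dict.getD_insert_self]
      · rw [PySem.Dict.getD_insert_of_ne _ _ _ h]; exact hd
  exact this nodes PySem.Dict.empty (PySem.Dict.getD_empty k PySem.Set.empty)

-- B's dict build: keys and values ---------------------------------------------------------------

theorem keys_B (nodes : List Int) (f : Int → PySem.Set Int) :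
    ((PySem.List.dedup nodes).foldl (fun g n => g.insert n (f n)) PySem.Dict.empty).keys = PySem.Set.ofList nodes := by
  rw [PySem.Dict.keys_foldl_insert (PySem.List.dedup nodes) (fun _ n => f n) PySem.Dict.empty,
    PySem.Dict.keys_empty, PySem.Set.update_nil_left, PySem.List.dedup_eq_ofList,
    PySem.Set.ofList_ofList]

theorem getD_B (nodes : List Int) (f : Int → PySem.Set Int) (k : Int) :
    ∀ d : PySem.Dict Int (PySem.Set Int),
      (nodes.foldl (fun g n => g.insert n (f n)) d).getD k PySem.Set.empty =
        if k ∈ nodes then f k else d.getD k PySem.Set.empty := by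
  induction nodes with
  | nil => intro d; simp
  | cons n ns ih =>
    intro d
    rw [List.foldl_cons, ih]
    by_cases hk : k ∈ ns
    · rw [if_pos hk, if_pos (by simp [hk])]
    · rw [if_neg hk]
      by_cases he : k = n
      · subst he
        rw [PySem.Dict.getD_insert_self, if_pos (by simp)]
      · rw [PySem.Dict.getD_insert_of_ne _ _ _ he, if_neg (by simp [hk, he])]

-- ===== VERDICT (by name: the statement is the Claim_ definition above) =====
theorem build_overlap_graph_spec : Claim_equal_build_overlap_graph := by
  intro nodes fmts _hdom hpre
  unfold Spec_build_overlap_graph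
  rw [portA_eq, portB_eq]
  have hkeysub : ∀ l ∈ fmts, ∀ y ∈ keysOf l, y ∈ (initG nodes).keys := by
    intro l hl y hy
    rw [keys_initG, PySem.Set.mem_ofList]
    unfold keysOf at hy
    split at hy
    · simp at hy
    · exact hpre l hl (by omega) y hy
  have hkA : (fmts.foldl aLoop (initG nodes)).keys = (initG nodes).keys :=
    keys_fold_preserve aLoop keysOf (fun g l h => keys_aLoop l g h) fmts (initG nodes) hkeysub
  rw [PySem.Dict.items_eq_map_keys _ (hkA ▸ nodup_keys_initG nodes) PySem.Set.empty,
    PySem.Dict.items_eq_map_keys _ ((keys_B nodes (adjOf fmts)) ▸ PySem.Set.nodup_ofList nodes) PySem.Set.empty,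
    hkA, keys_initG, keys_B]
  apply List.map_congr_left
  intro k hk
  have hknodes : k ∈ nodes := (PySem.Set.mem_ofList nodes k).mp hk
  have h1 := getD_foldl aLoop evA k (fun g l => getD_aLoop l g k) fmts (initG nodes)
  rw [h1, getD_initG, getD_B, if_pos ((PySem.List.mem_dedup nodes k).mpr hknodes),
    pointwise k fmts PySem.Set.empty]
  rfl
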